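-- pv_equiv track=rewrite | github.com/dext0r/yandex_smart_home | custom_components/yandex_smart_home/capability.py | get_supported_scenes
-- ===== SOURCE A (Python) =====
-- def get_supported_scenes(scenes_map: dict[str, list[str]],
--                          entity_effect_list: list[str]) -> set[str]:
--     yandex_scenes = set()
--     for effect in entity_effect_list:
--         for yandex_scene, ha_effects in scenes_map.items():
--             if effect in ha_effects:
--                 yandex_scenes.add(yandex_scene)
--
--     return yandex_scenes
-- ===== SOURCE B (Python) =====
-- def get_supported_scenes(scenes_map: dict[str, list[str]],
--                          entity_effect_list: list[str]) -> set[str]: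
--     # Reverse index built once: effect -> scenes containing it (in scenes_map order).
--     effect_to_scenes: dict[str, list[str]] = {}
--     for yandex_scene, ha_effects in scenes_map.items():
--         for effect in dict.fromkeys(ha_effects):
--             effect_to_scenes.setdefault(effect, []).append(yandex_scene)
--
--     yandex_scenes = set()
--     for effect in entity_effect_list:
--         yandex_scenes.update(effect_to_scenes.get(effect, ()))
--
--     return yandex_scenes
-- ===== Notes on version B (the rewrite author's own statement) =====
-- stated objective: faster
-- what changed: B builds a reverse index effect->scenes over scenes_map once and then unions the looked-up scene lists of each entity effect into the result set, replacing A's per-effect scan of every scene's effect list.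
import Mathlib
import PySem

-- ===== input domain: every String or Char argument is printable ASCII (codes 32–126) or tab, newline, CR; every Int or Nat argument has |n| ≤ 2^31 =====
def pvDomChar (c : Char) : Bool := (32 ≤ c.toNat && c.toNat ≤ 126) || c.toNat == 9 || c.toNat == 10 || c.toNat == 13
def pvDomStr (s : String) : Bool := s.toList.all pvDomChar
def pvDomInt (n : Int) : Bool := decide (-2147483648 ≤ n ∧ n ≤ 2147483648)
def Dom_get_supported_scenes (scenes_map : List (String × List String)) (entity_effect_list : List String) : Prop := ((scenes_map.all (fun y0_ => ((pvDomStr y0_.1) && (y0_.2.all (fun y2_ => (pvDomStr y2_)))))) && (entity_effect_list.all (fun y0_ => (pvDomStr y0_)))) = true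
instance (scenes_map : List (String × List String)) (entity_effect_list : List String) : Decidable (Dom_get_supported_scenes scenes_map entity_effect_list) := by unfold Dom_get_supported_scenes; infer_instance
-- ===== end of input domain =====

-- B replaces A's per-effect scan of scenes_map by a reverse index effect->scenes built once (objective: faster).
-- ===== PORT A =====
def get_supported_scenes (scenes_map : List (String × List String)) (entity_effect_list : List String) : List String :=
  entity_effect_list.foldl (fun yandex_scenes effect =>
    scenes_map.foldl (fun yandex_scenes p =>
      if p.2.contains effect then PySem.Set.add yandex_scenes p.1 else yandex_scenes)
      yandex_scenes)
    PySem.Set.empty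

-- ===== PORT B =====
def get_supported_scenes_alt (scenes_map : List (String × List String)) (entity_effect_list : List String) : List String :=
  let effect_to_scenes : PySem.Dict String (List String) :=
    scenes_map.foldl (fun d p =>
      (PySem.List.dedup p.2).foldl (fun d effect =>
        d.insert effect (d.getD effect [] ++ [p.1])) d)
      PySem.Dict.empty
  entity_effect_list.foldl (fun yandex_scenes effect =>
    PySem.Set.update yandex_scenes (effect_to_scenes.getD effect []))
    PySem.Set.empty

-- ===== PRECONDITION & SPEC =====
def Spec_get_supported_scenes (scenes_map : List (String × List String)) (entity_effect_list : List String) (out : List String) : Prop := out = get_supported_scenes_alt scenes_map entity_effect_list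
instance (scenes_map : List (String × List String)) (entity_effect_list : List String) (out : List String) : Decidable (Spec_get_supported_scenes scenes_map entity_effect_list out) := by unfold Spec_get_supported_scenes; infer_instance

-- ===== CLAIM (what is proved, stated in full; the proofs are below) =====
def Claim_equal_get_supported_scenes : Prop := ∀ (scenes_map : List (String × List String)) (entity_effect_list : List String), Dom_get_supported_scenes scenes_map entity_effect_list → Spec_get_supported_scenes scenes_map entity_effect_list (get_supported_scenes scenes_map entity_effect_list)

-- ===== LEMMAS AND PROOFS =====
-- the scenes whose effect list contains e, in scenes_map order
def scenesFor (e : String) (sm : List (String × List String)) : List String :=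
  (sm.filter (fun p => p.2.contains e)).map (·.1)

theorem getD_fold_insert_not_mem (es : List String) (s : String)
    (d : PySem.Dict String (List String)) (e : String) (he : e ∉ es) :
    (es.foldl (fun d x => d.insert x (d.getD x [] ++ [s])) d).getD e [] = d.getD e [] := by
  induction es generalizing d with
  | nil => rfl
  | cons x es ih =>
      simp only [List.foldl_cons]
      rw [ih _ (fun h => he (List.mem_cons_of_mem _ h)), PySem.Dict.getD_insert]
      simp only [List.mem_cons, not_or] at he
      simp [he.1]

theorem getD_fold_insert_nodup (es : List String) (s : String)
    (d : PySem.Dict String (List String)) (e : String) (hnd : es.Nodup) :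
    (es.foldl (fun d x => d.insert x (d.getD x [] ++ [s])) d).getD e [] =
      d.getD e [] ++ (if e ∈ es then [s] else []) := by
  induction es generalizing d with
  | nil => simp
  | cons x es ih =>
      simp only [List.foldl_cons, List.mem_cons]
      rcases List.nodup_cons.mp hnd with ⟨hx, hnd'⟩
      by_cases hex : e = x
      · subst hex
        rw [getD_fold_insert_not_mem es s _ e hx, PySem.Dict.getD_insert_self]
        simp [hx]
      · rw [ih _ hnd', PySem.Dict.getD_insert]
        simp [hex]

theorem getD_build (sm : List (String × List String))
    (d : PySem.Dict String (List String)) (e : String) :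
    (sm.foldl (fun d p =>
        (PySem.List.dedup p.2).foldl (fun d effect =>
          d.insert effect (d.getD effect [] ++ [p.1])) d) d).getD e [] =
      d.getD e [] ++ scenesFor e sm := by
  induction sm generalizing d with
  | nil => simp [scenesFor]
  | cons p sm ih =>
      simp only [List.foldl_cons]
      rw [ih, getD_fold_insert_nodup _ _ _ _ (PySem.List.nodup_dedup p.2)]
      by_cases h : p.2.contains e
      · simp [scenesFor, List.contains_iff_mem.mp h]
      · have : e ∉ p.2 := fun hm => h (List.contains_iff_mem.mpr hm)
        simp [scenesFor, this]

theorem inner_A_eq (sm : List (String × List String)) (e : String) (ys : PySem.Set String) :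
    sm.foldl (fun ys p => if p.2.contains e then PySem.Set.add ys p.1 else ys) ys =
      (scenesFor e sm).foldl (fun ys s => PySem.Set.add ys s) ys := by
  induction sm generalizing ys with
  | nil => rfl
  | cons p sm ih =>
      by_cases h : p.2.contains e
      · have hm : e ∈ p.2 := List.contains_iff_mem.mp h
        have hs : scenesFor e (p :: sm) = p.1 :: scenesFor e sm := by
          simp [scenesFor, hm]
        rw [hs]; simp only [List.foldl_cons, if_pos h]; exact ih _
      · have hm : e ∉ p.2 := fun m => h (List.contains_iff_mem.mpr m)
        have hs : scenesFor e (p :: sm) = scenesFor e sm := by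
          simp [scenesFor, hm]
        rw [hs]; simp only [List.foldl_cons, if_neg h]; exact ih _

-- ===== VERDICT (by name: the statement is the Claim_ definition above) =====
theorem get_supported_scenes_spec : Claim_equal_get_supported_scenes := by
  intro sm el _
  show get_supported_scenes sm el = get_supported_scenes_alt sm el
  unfold get_supported_scenes get_supported_scenes_alt
  simp only []
  congr 1
  funext ys e
  rw [inner_A_eq, getD_build, PySem.Dict.getD_empty, List.nil_append, PySem.Set.update]
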